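-- pv_equiv track=rewrite | github.com/Kurlie/adventOfCode2020 | Day09/day9.py | weaknessXMAS
-- ===== SOURCE A (Python) =====
-- def weaknessXMAS(list, peambleLen):
--     def check(num):
--         for j in preamble:
--             if ((num-j) in preamble and ((num-j) != j)):
--                 return False
--         return True
--
--     numbers = list[peambleLen:]
--     for i in range(len(numbers)):
--         # i is the start of the list 1 after end of preamble
--         preamble = list[i:i+peambleLen]
--
--         if (check(numbers[i])):
--             return numbers[i]
-- ===== SOURCE B (Python) =====
-- def weaknessXMAS(list, peambleLen):
--     numbers = list[peambleLen:]
--     for i in range(len(numbers)):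
--         window = sorted(list[i:i+peambleLen])
--         target = numbers[i]
--         lo, hi = 0, len(window) - 1
--         found = False
--         while lo < hi:
--             s = window[lo] + window[hi]
--             if s == target:
--                 if window[lo] != window[hi]:
--                     found = True
--                 break
--             elif s < target:
--                 lo += 1
--             else:
--                 hi -= 1
--         if not found:
--             return target
--     return None
-- ===== Notes on version B (the rewrite author's own statement) =====
-- stated objective: alternative
-- what changed: Per window, A scans every preamble element and does a linear membership test for its complement (quadratic per window); B sorts a copy of the window once and runs a two-pointer inward scan over the sorted window, reporting a hit only when the two pointed values differ.
import Mathlib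
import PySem

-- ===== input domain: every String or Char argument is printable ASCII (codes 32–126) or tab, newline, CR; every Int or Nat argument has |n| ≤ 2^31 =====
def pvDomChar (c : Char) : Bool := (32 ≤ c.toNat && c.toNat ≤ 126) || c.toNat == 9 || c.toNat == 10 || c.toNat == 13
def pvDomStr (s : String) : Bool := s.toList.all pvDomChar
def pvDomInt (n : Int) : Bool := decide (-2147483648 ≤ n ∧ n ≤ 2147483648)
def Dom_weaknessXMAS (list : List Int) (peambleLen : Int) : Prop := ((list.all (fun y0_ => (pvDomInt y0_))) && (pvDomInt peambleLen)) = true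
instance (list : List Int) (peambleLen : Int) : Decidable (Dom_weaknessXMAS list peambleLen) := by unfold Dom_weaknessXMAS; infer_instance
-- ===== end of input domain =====

-- B replaces A's quadratic per-window membership scan with a sort + two-pointer scan per window (alternative algorithm).


-- ===== PORT A =====
-- inner 'check': for j in preamble: if (num-j) in preamble and (num-j) != j: return False; return True
def pvCheckGo (preamble : List Int) (num : Int) : List Int → Bool
  | [] => true
  | j :: rest => if (num - j) ∈ preamble ∧ (num - j) ≠ j then false else pvCheckGo preamble num rest

-- outer loop: for i in range(len(numbers)): preamble = list[i:i+peambleLen]; if check(numbers[i]): return numbers[i]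
def pvLoopA (list : List Int) (peambleLen : Int) (numbers : List Int) (i : Nat) : Option Int :=
  if h : i < numbers.length then
    let preamble := PySem.List.slice list (some (i : Int)) (some ((i : Int) + peambleLen))
    if pvCheckGo preamble numbers[i] preamble then some numbers[i]
    else pvLoopA list peambleLen numbers (i + 1)
  else none
termination_by numbers.length - i

def weaknessXMAS (list : List Int) (peambleLen : Int) : Option Int :=
  pvLoopA list peambleLen (PySem.List.slice list (some peambleLen) none) 0

-- ===== PORT B =====
-- two-pointer scan over the sorted window: found ↔ a distinct-valued pair sums to target
def pvTwoPtr (w : List Int) (target : Int) (lo hi : Nat) : Bool :=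
  if h : lo < hi then
    let s := w.getD lo 0 + w.getD hi 0
    if s = target then decide (w.getD lo 0 ≠ w.getD hi 0)
    else if s < target then pvTwoPtr w target (lo + 1) hi
    else pvTwoPtr w target lo (hi - 1)
  else false
termination_by hi - lo
decreasing_by all_goals omega

def pvLoopB (list : List Int) (peambleLen : Int) (numbers : List Int) (i : Nat) : Option Int :=
  if h : i < numbers.length then
    let window := PySem.List.sorted (PySem.List.slice list (some (i : Int)) (some ((i : Int) + peambleLen))) (fun x => x) false
    let target := numbers[i]
    if pvTwoPtr window target 0 (window.length - 1) then pvLoopB list peambleLen numbers (i + 1)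
    else some target
  else none
termination_by numbers.length - i

def weaknessXMAS_alt (list : List Int) (peambleLen : Int) : Option Int :=
  pvLoopB list peambleLen (PySem.List.slice list (some peambleLen) none) 0

-- ===== PRECONDITION & SPEC =====
def Spec_weaknessXMAS (list : List Int) (peambleLen : Int) (out : Option Int) : Prop := out = weaknessXMAS_alt list peambleLen
instance (list : List Int) (peambleLen : Int) (out : Option Int) : Decidable (Spec_weaknessXMAS list peambleLen out) := by unfold Spec_weaknessXMAS; infer_instance

-- ===== CLAIM (what is proved, stated in full; the proofs are below) =====
def Claim_equal_weaknessXMAS : Prop := ∀ (list : List Int) (peambleLen : Int), Dom_weaknessXMAS list peambleLen → Spec_weaknessXMAS list peambleLen (weaknessXMAS list peambleLen)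

-- ===== LEMMAS AND PROOFS =====

-- a distinct-valued pair of window values summing to t, as an index pair inside [lo, hi]
def pvPair (w : List Int) (t : Int) (lo hi : Nat) : Prop :=
  ∃ i j : Nat, lo ≤ i ∧ i < j ∧ j ≤ hi ∧ j < w.length ∧
    w.getD i 0 + w.getD j 0 = t ∧ w.getD i 0 ≠ w.getD j 0

lemma pvIfNot {α : Type} (b : Bool) (x y : α) :
    (if (!b) = true then x else y) = if b = true then y else x := by
  cases b <;> simp

lemma pvCheckGo_eq_true_iff (p : List Int) (num : Int) (l : List Int) :
    pvCheckGo p num l = true ↔ ∀ j ∈ l, ¬((num - j) ∈ p ∧ (num - j) ≠ j) := by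
  induction l with
  | nil => simp [pvCheckGo]
  | cons j rest ih =>
    simp only [pvCheckGo]
    split_ifs with h
    · simp [h]
    · rw [ih, List.forall_mem_cons]
      tauto

lemma pvSorted_getD_mono {w : List Int} (hw : w.Pairwise (· ≤ ·))
    {i j : Nat} (hij : i ≤ j) (hj : j < w.length) :
    w.getD i 0 ≤ w.getD j 0 := by
  rcases eq_or_lt_of_le hij with rfl | hlt
  · exact le_refl _
  · rw [List.getD_eq_getElem w 0 (lt_of_le_of_lt hij hj), List.getD_eq_getElem w 0 hj]
    exact List.pairwise_iff_getElem.mp hw i j _ _ hlt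

lemma pvTwoPtr_iff {w : List Int} (hw : w.Pairwise (· ≤ ·)) (t : Int) :
    ∀ lo hi : Nat, hi < w.length → (pvTwoPtr w t lo hi = true ↔ pvPair w t lo hi) := by
  intro lo hi
  induction hlh : hi - lo using Nat.strong_induction_on generalizing lo hi with
  | _ n ih =>
  intro hhi
  rw [pvTwoPtr]
  by_cases h : lo < hi
  · simp only [h, dif_pos]
    by_cases hs : w.getD lo 0 + w.getD hi 0 = t
    · rw [if_pos hs]
      constructor
      · intro hne
        exact ⟨lo, hi, le_refl _, h, le_refl _, hhi, hs, of_decide_eq_true hne⟩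
      · rintro ⟨i, j, hli, hij, hjh, hjl, hsum, hne⟩
        by_contra hd
        have heq : w.getD lo 0 = w.getD hi 0 := by
          by_contra hx; exact hd (decide_eq_true hx)
        have h1 := pvSorted_getD_mono hw hli (show i < w.length by omega)
        have h2 := pvSorted_getD_mono hw hij.le hjl
        have h3 := pvSorted_getD_mono hw hjh hhi
        exact hne (le_antisymm h2 (by omega))
    · rw [if_neg hs]
      by_cases hlt : w.getD lo 0 + w.getD hi 0 < t
      · rw [if_pos hlt, ih (hi - (lo + 1)) (by omega) (lo + 1) hi rfl hhi]
        constructor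
        · rintro ⟨i, j, hli, hij, hjh, hjl, hsum, hne⟩
          exact ⟨i, j, by omega, hij, hjh, hjl, hsum, hne⟩
        · rintro ⟨i, j, hli, hij, hjh, hjl, hsum, hne⟩
          refine ⟨i, j, ?_, hij, hjh, hjl, hsum, hne⟩
          rcases Nat.lt_or_ge lo i with hi' | hi'
          · omega
          · -- i = lo: w[lo] + w[j] ≤ w[lo] + w[hi] < t contradicts the pair's sum = t
            have hieq : i = lo := by omega
            subst hieq
            have := pvSorted_getD_mono hw hjh hhi
            omega
      · rw [if_neg hlt, ih ((hi - 1) - lo) (by omega) lo (hi - 1) rfl (by omega)]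
        have hgt : t < w.getD lo 0 + w.getD hi 0 := by omega
        constructor
        · rintro ⟨i, j, hli, hij, hjh, hjl, hsum, hne⟩
          exact ⟨i, j, hli, hij, by omega, hjl, hsum, hne⟩
        · rintro ⟨i, j, hli, hij, hjh, hjl, hsum, hne⟩
          refine ⟨i, j, hli, hij, ?_, hjl, hsum, hne⟩
          rcases Nat.lt_or_ge j hi with hj' | hj'
          · omega
          · -- j = hi: t = w[i] + w[hi] ≥ w[lo] + w[hi] > t, contradiction
            have hjeq : j = hi := by omega
            subst hjeq
            have := pvSorted_getD_mono hw hli (show i < w.length by omega)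
            omega
  · rw [dif_neg h]
    simp only [Bool.false_eq_true, false_iff]
    rintro ⟨i, j, hli, hij, hjh, -, -, -⟩
    omega

-- the distinct-pair condition in value form (A's check condition)
def pvVal (p : List Int) (t : Int) : Prop := ∃ j ∈ p, (t - j) ∈ p ∧ (t - j) ≠ j

lemma pvPair_iff_val {w : List Int} (t : Int) :
    pvPair w t 0 (w.length - 1) ↔ pvVal w t := by
  constructor
  · rintro ⟨i, j, _, hij, _, hjl, hsum, hne⟩
    have hil : i < w.length := lt_trans hij hjl
    refine ⟨w.getD i 0, ?_, ?_, ?_⟩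
    · rw [List.getD_eq_getElem w 0 hil]; exact List.getElem_mem _
    · have hb : t - w.getD i 0 = w.getD j 0 := by omega
      rw [hb, List.getD_eq_getElem w 0 hjl]; exact List.getElem_mem _
    · intro hx; apply hne; omega
  · rintro ⟨a, ha, hb, hne⟩
    obtain ⟨ia, hia, hga⟩ := List.getElem_of_mem ha
    obtain ⟨ib, hib, hgb⟩ := List.getElem_of_mem hb
    have hgetA : w.getD ia 0 = a := by rw [List.getD_eq_getElem w 0 hia, hga]
    have hgetB : w.getD ib 0 = t - a := by rw [List.getD_eq_getElem w 0 hib, hgb]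
    have hne' : ia ≠ ib := by intro hx; subst hx; rw [hgetA] at hgetB; omega
    rcases Nat.lt_or_ge ia ib with hlt | hge
    · exact ⟨ia, ib, Nat.zero_le _, hlt, by omega, hib, by omega, by omega⟩
    · exact ⟨ib, ia, Nat.zero_le _, by omega, by omega, hia, by omega, by omega⟩

-- per window: A's check is the negation of B's two-pointer verdict
lemma pvWindow_agree (p : List Int) (t : Int) :
    pvCheckGo p t p =
      !(pvTwoPtr (PySem.List.sorted p (fun x => x) false) t 0
        ((PySem.List.sorted p (fun x => x) false).length - 1)) := by
  have key : ∀ w : List Int, w.Perm p → w.Pairwise (· ≤ ·) →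
      pvCheckGo p t p = !(pvTwoPtr w t 0 (w.length - 1)) := by
    intro w hperm hw
    by_cases hnil : w = []
    · subst hnil
      have hp : p = [] := hperm.symm.eq_nil
      rw [hp]
      simp [pvCheckGo, pvTwoPtr]
    · have hlen : 0 < w.length := List.length_pos_of_ne_nil hnil
      have hiff := pvTwoPtr_iff hw t 0 (w.length - 1) (by omega)
      rcases hb : pvTwoPtr w t 0 (w.length - 1) with _ | _
      · -- scan found nothing: no distinct-valued pair exists, check returns True
        simp only [Bool.not_false]
        rw [pvCheckGo_eq_true_iff]
        intro j hj ⟨hmem, hne⟩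
        have : pvPair w t 0 (w.length - 1) :=
          (pvPair_iff_val t).mpr ⟨j, hperm.mem_iff.mpr hj, hperm.mem_iff.mpr hmem, hne⟩
        rw [hb] at hiff
        simp at hiff
        exact hiff this
      · -- scan found a pair: check must return False
        simp only [Bool.not_true]
        rw [hb] at hiff
        obtain ⟨j, hj, hmem, hne⟩ := (pvPair_iff_val t).mp (hiff.mp rfl)
        rw [← Bool.not_eq_true, pvCheckGo_eq_true_iff]
        intro hall
        exact hall j (hperm.mem_iff.mp hj) ⟨hperm.mem_iff.mp hmem, hne⟩
  exact key _ (PySem.List.sorted_perm p (fun x => x) false)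
    (PySem.List.sorted_pairwise p (fun x => x))

lemma pvLoop_agree (list : List Int) (peambleLen : Int) (numbers : List Int) :
    ∀ i : Nat, pvLoopA list peambleLen numbers i = pvLoopB list peambleLen numbers i := by
  intro i
  induction hni : numbers.length - i using Nat.strong_induction_on generalizing i with
  | _ n ih =>
  rw [pvLoopA, pvLoopB]
  by_cases h : i < numbers.length
  · simp only [h, dif_pos]
    rw [pvWindow_agree, pvIfNot, ih (numbers.length - (i + 1)) (by omega) (i + 1) rfl]
  · simp [h]

-- ===== VERDICT (by name: the statement is the Claim_ definition above) =====
theorem weaknessXMAS_spec : Claim_equal_weaknessXMAS := by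
  intro list peambleLen _
  unfold Spec_weaknessXMAS weaknessXMAS weaknessXMAS_alt
  exact pvLoop_agree list peambleLen _ 0
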